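-- pv_equiv track=rewrite | github.com/Tongky-HGU/Algorithm | Python/4주차_DP,그리디/프로그래머스_조이스틱.py | solution
-- ===== SOURCE A (Python) =====
-- def calClickNum(char):
--     return min(ord(char)-ord('A'),ord('Z')-ord(char)+1)
--
-- def findPos(idx,cur,name,right):
--     move = 0
--     while(cur[idx]==name[idx]):
--         idx += right
--         move +=1
--         if(idx<0):
--             idx = len(cur) -1
--         if(idx>=len(cur)):
--             idx =0
--     return [idx,move]
--
-- def solution(name):
--     cur = ['A']*len(name)
--     control=0
--     idx=0
--     while(''.join(cur) != name):
--         r, moveR = findPos(idx,cur,name,1)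
--         l, moveL = findPos(idx,cur,name,-1)
--         idx,moveNext = [r,moveR] if moveR <= moveL else [l,moveL]
--         upControl = calClickNum(name[idx])
--         control += moveNext + upControl
--         cur[idx] = name[idx]
--
--     return control
-- ===== SOURCE B (Python) =====
-- def solution(name):
--     n = len(name)
--     # positions that ever need fixing (joystick up/down), in increasing order
--     pos = [i for i, c in enumerate(name) if c != 'A']
--     # total up/down clicks, independent of visiting order
--     clicks = sum(min(ord(c) - 65, 91 - ord(c)) for c in name if c != 'A')
--     # two-pointer sweep: the unfixed positions always form a contiguous
--     # circular block pos[i..j]; the cursor sits just outside one of its ends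
--     i, j = 0, len(pos) - 1
--     cur = 0
--     moves = 0
--     while i <= j:
--         mr = (pos[i] - cur) % n
--         ml = (cur - pos[j]) % n
--         if mr <= ml:
--             moves += mr
--             cur = pos[i]
--             i += 1
--         else:
--             moves += ml
--             cur = pos[j]
--             j -= 1
--     return moves + clicks
-- ===== Notes on version B (the rewrite author's own statement) =====
-- stated objective: faster
-- what changed: A repeatedly rescans the whole string character-by-character (findPos in both directions) each time it fixes one letter; B precomputes the sorted list of non-'A' positions and the total up/down clicks once, then finds each nearest unfixed position in O(1) with a two-pointer sweep, exploiting that the unfixed positions always form one contiguous circular block.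
import Mathlib
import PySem

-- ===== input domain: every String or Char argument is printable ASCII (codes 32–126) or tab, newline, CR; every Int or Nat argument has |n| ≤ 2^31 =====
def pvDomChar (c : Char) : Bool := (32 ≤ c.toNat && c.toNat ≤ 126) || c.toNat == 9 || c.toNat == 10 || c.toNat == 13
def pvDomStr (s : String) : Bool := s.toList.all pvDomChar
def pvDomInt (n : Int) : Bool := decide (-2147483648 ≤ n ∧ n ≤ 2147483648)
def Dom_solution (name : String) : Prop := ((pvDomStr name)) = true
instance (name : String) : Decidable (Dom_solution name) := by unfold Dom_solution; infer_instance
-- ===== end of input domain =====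

-- B replaces A's repeated circular scans with a single two-pointer sweep over the
-- sorted non-'A' positions (the unfixed positions always form one contiguous circular
-- block), measured faster in a timing run on large inputs.

-- ===== PORT A =====
def calClickNum (c : Char) : Int :=
  min ((c.toNat : Int) - 65) (90 - (c.toNat : Int) + 1)

-- while cur[idx]==name[idx]: idx += right; move += 1; wrap.  Fuel-bounded loop
-- (fuel = len(cur) always suffices at A's call sites: some position differs there).
def findPosGo (fuel : Nat) (idx : Int) (cur name : List Char) (right : Int) (move : Int) : Int × Int :=
  match fuel with
  | 0 => (idx, move)
  | f + 1 =>
    if PySem.List.pyGet? cur idx = PySem.List.pyGet? name idx then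
      let idx1 := idx + right
      let move1 := move + 1
      let idx2 := if idx1 < 0 then (cur.length : Int) - 1 else idx1
      let idx3 := if idx2 ≥ (cur.length : Int) then 0 else idx2
      findPosGo f idx3 cur name right move1
    else (idx, move)

def findPos (idx : Int) (cur name : List Char) (right : Int) : Int × Int :=
  findPosGo cur.length idx cur name right 0

-- the outer while loop of A; fuel = len(name) suffices (each pass fixes one position)
def solGo (fuel : Nat) (cur : List Char) (idx control : Int) (name : List Char) : Int :=
  match fuel with
  | 0 => control
  | f + 1 =>
    if cur = name then control
    else
      let rR := findPos idx cur name 1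
      let rL := findPos idx cur name (-1)
      let pick := if rR.2 ≤ rL.2 then rR else rL
      -- name[pick.1]: the index is always in range here, so the default is never used
      let upControl := calClickNum (PySem.List.pyGetD name pick.1 'A')
      solGo f (PySem.List.pySetD cur pick.1 (PySem.List.pyGetD name pick.1 'A'))
        pick.1 (control + pick.2 + upControl) name

def solution (name : String) : Int :=
  solGo name.toList.length (List.replicate name.toList.length 'A') 0 0 name.toList

-- ===== PORT B =====
-- two-pointer sweep over pos[i..j]; fuel = len(pos) is exactly the iteration count
def goB (fuel : Nat) (i j cur moves : Int) (pos : List Int) (n : Int) : Int :=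
  match fuel with
  | 0 => moves
  | f + 1 =>
    if i ≤ j then
      -- pos[i], pos[j]: in range while i ≤ j, so the default is never used
      let pi := PySem.List.pyGetD pos i 0
      let pj := PySem.List.pyGetD pos j 0
      let mr := PySem.Int.mod (pi - cur) n
      let ml := PySem.Int.mod (cur - pj) n
      if mr ≤ ml then goB f (i + 1) j pi (moves + mr) pos n
      else goB f i (j - 1) pj (moves + ml) pos n
    else moves

def solution_alt (name : String) : Int :=
  let L := name.toList
  let n : Int := L.length
  let pos : List Int := ((PySem.List.enumerate L 0).filter (fun p => p.2 != 'A')).map (fun p => p.1)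
  let clicks : Int := ((L.filter (fun c => c != 'A')).map
      (fun c => min ((c.toNat : Int) - 65) (91 - (c.toNat : Int)))).sum
  goB pos.length 0 ((pos.length : Int) - 1) 0 0 pos n + clicks

-- ===== PRECONDITION & SPEC =====
def Spec_solution (name : String) (out : Int) : Prop := out = solution_alt name
instance (name : String) (out : Int) : Decidable (Spec_solution name out) := by unfold Spec_solution; infer_instance

-- ===== CLAIM (what is proved, stated in full; the proofs are below) =====
def Claim_equal_solution : Prop := ∀ (name : String), Dom_solution name → Spec_solution name (solution name)

-- ===== LEMMAS AND PROOFS =====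

-- circular distances (n = length): steps right / left from a to b
def dR (n a b : Int) : Int := (b - a) % n
def dL (n a b : Int) : Int := (a - b) % n

def clickAt (L : List Char) (p : Int) : Int := calClickNum (PySem.List.pyGetD L p 'A')

-- up/down clicks for window pos[ia .. ia+cnt)
def cw (L : List Char) (pos : List Int) (ia cnt : Nat) : Int :=
  ∑ t ∈ Finset.range cnt, clickAt L (pos.getD (ia + t) 0)

lemma emod_shift (a b n : Int) : (a % n + b) % n = (a + b) % n := by
  rw [Int.add_emod, Int.emod_emod_of_dvd _ dvd_rfl, ← Int.add_emod]

lemma emod_shift_sub (a b n : Int) : (a % n - b) % n = (a - b) % n := by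
  rw [sub_eq_add_neg, sub_eq_add_neg, emod_shift]

lemma emod_shift_sub' (a b n : Int) : (b - a % n) % n = (b - a) % n := by
  rw [Int.sub_emod, Int.emod_emod_of_dvd _ dvd_rfl, ← Int.sub_emod]

lemma emod_sub_eval {x y n : Int} (hx0 : 0 ≤ x) (hxn : x < n) (hy0 : 0 ≤ y) (hyn : y < n) :
    (y - x) % n = if x ≤ y then y - x else y - x + n := by
  split_ifs with h
  · exact Int.emod_eq_of_lt (by omega) (by omega)
  · have h1 : (y - x + n) % n = (y - x) % n := by
      have := Int.add_mul_emod_self_left (a := y - x) (b := n) (c := 1)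
      simp only [mul_one] at this
      exact this
    rw [← h1]
    exact Int.emod_eq_of_lt (by omega) (by omega)

lemma findPosGo_succ (f : Nat) (idx : Int) (cur L : List Char) (right move : Int)
    (h : PySem.List.pyGet? cur idx = PySem.List.pyGet? L idx) :
    findPosGo (f + 1) idx cur L right move
      = findPosGo f (if (if idx + right < 0 then (cur.length : Int) - 1 else idx + right) ≥ (cur.length : Int)
            then 0 else (if idx + right < 0 then (cur.length : Int) - 1 else idx + right))
          cur L right (move + 1) := by
  simp [findPosGo, h]

lemma findPosGo_stop (fuel : Nat) (idx : Int) (cur L : List Char) (right move : Int)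
    (h : PySem.List.pyGet? cur idx ≠ PySem.List.pyGet? L idx) :
    findPosGo fuel idx cur L right move = (idx, move) := by
  cases fuel with
  | zero => rfl
  | succ f => simp [findPosGo, h]

lemma findPosGo_right (cur L : List Char) (hlen : cur.length = L.length) (hn : 0 < L.length) :
    ∀ (d fuel : Nat) (idx move : Int), d ≤ fuel → 0 ≤ idx → idx < (L.length : Int) →
    (∀ t : Nat, t < d →
      PySem.List.pyGet? cur ((idx + t) % (L.length : Int)) = PySem.List.pyGet? L ((idx + t) % (L.length : Int))) →
    PySem.List.pyGet? cur ((idx + d) % (L.length : Int)) ≠ PySem.List.pyGet? L ((idx + d) % (L.length : Int)) →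
    findPosGo fuel idx cur L 1 move = ((idx + d) % (L.length : Int), move + d) := by
  have hpos : (0 : Int) < (L.length : Int) := by exact_mod_cast hn
  have hnz : (L.length : Int) ≠ 0 := hpos.ne'
  have hlen1 : (cur.length : Int) = (L.length : Int) := by exact_mod_cast hlen
  intro d
  induction d with
  | zero =>
    intro fuel idx move _ h0 hlt hall hd
    have hidx : (idx + ((0 : Nat) : Int)) % (L.length : Int) = idx := by
      simp only [Nat.cast_zero, add_zero]
      exact Int.emod_eq_of_lt h0 hlt
    rw [hidx] at hd ⊢
    simp only [Nat.cast_zero, add_zero]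
    exact findPosGo_stop fuel idx cur L 1 move hd
  | succ d ih =>
    intro fuel idx move hfuel h0 hlt hall hd
    obtain ⟨f, rfl⟩ : ∃ f, fuel = f + 1 := ⟨fuel - 1, by omega⟩
    have heq : PySem.List.pyGet? cur idx = PySem.List.pyGet? L idx := by
      have := hall 0 (by omega)
      simpa [Int.emod_eq_of_lt h0 hlt] using this
    rw [findPosGo_succ f idx cur L 1 move heq]
    have hstep : (if (if idx + 1 < 0 then (cur.length : Int) - 1 else idx + 1) ≥ (cur.length : Int)
        then 0 else (if idx + 1 < 0 then (cur.length : Int) - 1 else idx + 1))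
        = (idx + 1) % (L.length : Int) := by
      rw [hlen1]
      have h1 : ¬ (idx + 1 < 0) := by omega
      rw [if_neg h1]
      by_cases h2 : idx + 1 = (L.length : Int)
      · rw [if_pos (by omega), h2, Int.emod_self]
      · rw [if_neg (by omega), Int.emod_eq_of_lt (by omega) (by omega)]
    rw [hstep]
    have hkey : ∀ t : Int, ((idx + 1) % (L.length : Int) + t) % (L.length : Int)
        = (idx + (t + 1)) % (L.length : Int) := by
      intro t
      rw [emod_shift]
      ring_nf
    have := ih f ((idx + 1) % (L.length : Int)) (move + 1) (by omega)
      (Int.emod_nonneg _ hnz) (Int.emod_lt_of_pos _ hpos)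
      (fun t ht => by rw [hkey]; have := hall (t + 1) (by omega); simpa [add_comm, add_left_comm, add_assoc] using this)
      (by rw [hkey]; have hd' := hd; simpa [add_comm, add_left_comm, add_assoc] using hd')
    rw [this, hkey]
    simp only [Prod.mk.injEq]
    push_cast
    exact ⟨by ring_nf, by ring⟩

lemma findPosGo_left (cur L : List Char) (hlen : cur.length = L.length) (hn : 0 < L.length) :
    ∀ (d fuel : Nat) (idx move : Int), d ≤ fuel → 0 ≤ idx → idx < (L.length : Int) →
    (∀ t : Nat, t < d →
      PySem.List.pyGet? cur ((idx - t) % (L.length : Int)) = PySem.List.pyGet? L ((idx - t) % (L.length : Int))) →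
    PySem.List.pyGet? cur ((idx - d) % (L.length : Int)) ≠ PySem.List.pyGet? L ((idx - d) % (L.length : Int)) →
    findPosGo fuel idx cur L (-1) move = ((idx - d) % (L.length : Int), move + d) := by
  have hpos : (0 : Int) < (L.length : Int) := by exact_mod_cast hn
  have hnz : (L.length : Int) ≠ 0 := hpos.ne'
  have hlen1 : (cur.length : Int) = (L.length : Int) := by exact_mod_cast hlen
  intro d
  induction d with
  | zero =>
    intro fuel idx move _ h0 hlt hall hd
    have hidx : (idx - ((0 : Nat) : Int)) % (L.length : Int) = idx := by
      simp only [Nat.cast_zero, sub_zero]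
      exact Int.emod_eq_of_lt h0 hlt
    rw [hidx] at hd ⊢
    simp only [Nat.cast_zero, add_zero]
    exact findPosGo_stop fuel idx cur L (-1) move hd
  | succ d ih =>
    intro fuel idx move hfuel h0 hlt hall hd
    obtain ⟨f, rfl⟩ : ∃ f, fuel = f + 1 := ⟨fuel - 1, by omega⟩
    have heq : PySem.List.pyGet? cur idx = PySem.List.pyGet? L idx := by
      have := hall 0 (by omega)
      simpa [Int.emod_eq_of_lt h0 hlt] using this
    rw [findPosGo_succ f idx cur L (-1) move heq]
    have hstep : (if (if idx + (-1) < 0 then (cur.length : Int) - 1 else idx + (-1)) ≥ (cur.length : Int)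
        then 0 else (if idx + (-1) < 0 then (cur.length : Int) - 1 else idx + (-1)))
        = (idx - 1) % (L.length : Int) := by
      rw [hlen1]
      by_cases h1 : idx = 0
      · subst h1
        have c1 : (0 : Int) + (-1) < 0 := by norm_num
        rw [if_pos c1]
        have c2 : ¬ ((L.length : Int) - 1 ≥ (L.length : Int)) := by omega
        rw [if_neg c2]
        have e1 : ((0 : Int) - 1) % (L.length : Int) = ((0 : Int) - 1 + (L.length : Int) * 1) % (L.length : Int) :=
          (Int.add_mul_emod_self_left (a := (0 : Int) - 1) (b := (L.length : Int)) (c := 1)).symm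
        rw [e1, Int.emod_eq_of_lt (by omega) (by omega)]
        ring
      · have c1 : ¬ (idx + (-1) < 0) := by omega
        rw [if_neg c1]
        have c2 : ¬ (idx + (-1) ≥ (L.length : Int)) := by omega
        rw [if_neg c2, Int.emod_eq_of_lt (by omega) (by omega)]
        ring
    rw [hstep]
    have hkey : ∀ t : Int, ((idx - 1) % (L.length : Int) - t) % (L.length : Int)
        = (idx - (t + 1)) % (L.length : Int) := by
      intro t
      rw [emod_shift_sub]
      ring_nf
    have := ih f ((idx - 1) % (L.length : Int)) (move + 1) (by omega)
      (Int.emod_nonneg _ hnz) (Int.emod_lt_of_pos _ hpos)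
      (fun t ht => by rw [hkey]; have := hall (t + 1) (by omega); simpa [add_comm, add_left_comm, add_assoc] using this)
      (by rw [hkey]; have hd' := hd; simpa [add_comm, add_left_comm, add_assoc] using hd')
    rw [this, hkey]
    simp only [Prod.mk.injEq]
    push_cast
    exact ⟨by ring_nf, by ring⟩

lemma goB_acc (pos : List Int) (n : Int) :
    ∀ (fuel : Nat) (i j cur m : Int), goB fuel i j cur m pos n = m + goB fuel i j cur 0 pos n := by
  intro fuel
  induction fuel with
  | zero => intro i j cur m; simp [goB]
  | succ f ih =>
    intro i j cur m
    simp only [goB]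
    split_ifs with h1 h2
    · rw [ih _ _ _ (m + _), ih _ _ _ (0 + _)]; ring
    · rw [ih _ _ _ (m + _), ih _ _ _ (0 + _)]; ring
    · omega


lemma cw_zero (L : List Char) (pos : List Int) (ia : Nat) : cw L pos ia 0 = 0 := by
  simp [cw]

lemma cw_succ_left (L : List Char) (pos : List Int) (ia c : Nat) :
    cw L pos ia (c + 1) = clickAt L (pos.getD ia 0) + cw L pos (ia + 1) c := by
  unfold cw
  rw [Finset.sum_range_succ']
  have h1 : ∀ t : Nat, clickAt L (pos.getD (ia + (t + 1)) 0) = clickAt L (pos.getD (ia + 1 + t) 0) := by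
    intro t; congr 2; omega
  rw [Finset.sum_congr rfl (fun t _ => h1 t)]
  simp [add_comm]

lemma cw_succ_right (L : List Char) (pos : List Int) (ia c : Nat) :
    cw L pos ia (c + 1) = cw L pos ia c + clickAt L (pos.getD (ia + c) 0) := by
  unfold cw
  exact Finset.sum_range_succ _ _

lemma solGo_succ (f : Nat) (cur : List Char) (idx control : Int) (L : List Char)
    (hne : ¬ (cur = L)) (rR rL : Int × Int)
    (hR : findPos idx cur L 1 = rR) (hL : findPos idx cur L (-1) = rL) :
    solGo (f + 1) cur idx control L =
      if rR.2 ≤ rL.2 then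
        solGo f (PySem.List.pySetD cur rR.1 (PySem.List.pyGetD L rR.1 'A')) rR.1
          (control + rR.2 + calClickNum (PySem.List.pyGetD L rR.1 'A')) L
      else
        solGo f (PySem.List.pySetD cur rL.1 (PySem.List.pyGetD L rL.1 'A')) rL.1
          (control + rL.2 + calClickNum (PySem.List.pyGetD L rL.1 'A')) L := by
  simp only [solGo, if_neg hne, hR, hL]
  split_ifs <;> rfl

lemma goB_succ (f : Nat) (i j cur moves : Int) (pos : List Int) (n : Int) (h : i ≤ j) :
    goB (f + 1) i j cur moves pos n =
      if PySem.Int.mod (PySem.List.pyGetD pos i 0 - cur) n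
          ≤ PySem.Int.mod (cur - PySem.List.pyGetD pos j 0) n then
        goB f (i + 1) j (PySem.List.pyGetD pos i 0)
          (moves + PySem.Int.mod (PySem.List.pyGetD pos i 0 - cur) n) pos n
      else
        goB f i (j - 1) (PySem.List.pyGetD pos j 0)
          (moves + PySem.Int.mod (cur - PySem.List.pyGetD pos j 0) n) pos n := by
  simp only [goB, if_pos h]

-- the heart of the proof: A's loop from a window state = clicks of the window + B's sweep
lemma solGo_eq_goB (L : List Char) (pos : List Int)
    (hbd : ∀ p ∈ pos, 0 ≤ p ∧ p < (L.length : Int))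
    (hsort : pos.Pairwise (· < ·)) :
    ∀ (cnt ia : Nat) (cur : List Char) (idx control : Int),
    ia + cnt ≤ pos.length →
    cur.length = L.length →
    0 ≤ idx → idx < (L.length : Int) →
    (∀ p : Nat, p < L.length →
      (cur[p]? = L[p]? ↔ ¬ ∃ m : Nat, ia ≤ m ∧ m < ia + cnt ∧ pos.getD m 0 = (p : Int))) →
    (∀ m : Nat, ia ≤ m → m < ia + cnt →
      dR (L.length : Int) idx (pos.getD ia 0) ≤ dR (L.length : Int) idx (pos.getD m 0)) →
    ((cnt ≠ 0 ∧ pos.getD ia 0 = idx) ∨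
      (∀ m : Nat, ia ≤ m → m < ia + cnt →
        dL (L.length : Int) idx (pos.getD (ia + cnt - 1) 0) ≤ dL (L.length : Int) idx (pos.getD m 0))) →
    ∀ fuelA fuelB : Nat, cnt ≤ fuelA → cnt ≤ fuelB →
    solGo fuelA cur idx control L
      = control + cw L pos ia cnt
        + goB fuelB (ia : Int) ((ia : Int) + cnt - 1) idx 0 pos (L.length : Int) := by
  have hbdm : ∀ m : Nat, m < pos.length → 0 ≤ pos.getD m 0 ∧ pos.getD m 0 < (L.length : Int) := by
    intro m hm
    rw [List.getD_eq_getElem pos 0 hm]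
    exact hbd _ (List.getElem_mem hm)
  have hlt_mm : ∀ m1 m2 : Nat, m1 < m2 → m2 < pos.length → pos.getD m1 0 < pos.getD m2 0 := by
    intro m1 m2 h12 h2
    rw [List.getD_eq_getElem pos 0 (by omega), List.getD_eq_getElem pos 0 h2]
    exact List.pairwise_iff_getElem.mp hsort m1 m2 (by omega) h2 h12
  have hle_mm : ∀ m1 m2 : Nat, m1 ≤ m2 → m2 < pos.length → pos.getD m1 0 ≤ pos.getD m2 0 := by
    intro m1 m2 h12 h2
    rcases Nat.eq_or_lt_of_le h12 with h | h
    · rw [h]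
    · exact le_of_lt (hlt_mm m1 m2 h h2)
  intro cnt
  induction cnt with
  | zero =>
    intro ia cur idx control hwin hlen h0 hlt hcur hInvR hInvD fuelA fuelB hfa hfb
    have hceq : cur = L := by
      apply List.ext_getElem?
      intro p
      by_cases hp : p < L.length
      · exact (hcur p hp).mpr (by rintro ⟨m, h1, h2, h3⟩; omega)
      · rw [List.getElem?_eq_none (by omega), List.getElem?_eq_none (by omega)]
    have hA : solGo fuelA cur idx control L = control := by
      cases fuelA with
      | zero => rfl
      | succ f => simp [solGo, hceq]
    have hB : goB fuelB (ia : Int) ((ia : Int) + (0 : Nat) - 1) idx 0 pos (L.length : Int) = 0 := by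
      cases fuelB with
      | zero => rfl
      | succ f =>
        simp only [goB]
        rw [if_neg (by push_cast; omega)]
    rw [hA, hB, cw_zero]
    ring
  | succ c ih =>
    intro ia cur idx control hwin hlen h0 hlt hcur hInvR hInvD fuelA fuelB hfa hfb
    obtain ⟨fA, rfl⟩ : ∃ f, fuelA = f + 1 := ⟨fuelA - 1, by omega⟩
    obtain ⟨fB, rfl⟩ : ∃ f, fuelB = f + 1 := ⟨fuelB - 1, by omega⟩
    have hIaLt : ia < pos.length := by omega
    have hJLt : ia + c < pos.length := by omega
    set pIa := pos.getD ia 0 with hpIa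
    set pJ := pos.getD (ia + c) 0 with hpJ
    have hbdIa := hbdm ia hIaLt
    have hbdJ := hbdm (ia + c) hJLt
    have hn : 0 < L.length := by omega
    have hposn : (0 : Int) < (L.length : Int) := by exact_mod_cast hn
    have hnz : ((L.length : Int)) ≠ 0 := hposn.ne'
    set dRi := dR (L.length : Int) idx pIa with hdRi
    set dLj := dL (L.length : Int) idx pJ with hdLj
    have hdRi0 : 0 ≤ dRi := Int.emod_nonneg _ hnz
    have hdRin : dRi < (L.length : Int) := Int.emod_lt_of_pos _ hposn
    have hdLj0 : 0 ≤ dLj := Int.emod_nonneg _ hnz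
    have hdLjn : dLj < (L.length : Int) := Int.emod_lt_of_pos _ hposn
    -- pyGet?-level characterisation of "differing position"
    have hEq : ∀ q : Int, 0 ≤ q → q < (L.length : Int) →
        (PySem.List.pyGet? cur q = PySem.List.pyGet? L q
          ↔ ¬ ∃ m : Nat, ia ≤ m ∧ m < ia + (c + 1) ∧ pos.getD m 0 = q) := by
      intro q h1 h2
      rw [PySem.List.pyGet?_of_nonneg cur h1, PySem.List.pyGet?_of_nonneg L h1]
      have hq : q.toNat < L.length := by omega
      have := hcur q.toNat hq
      rwa [Int.toNat_of_nonneg h1] at this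
    have hneqIa : PySem.List.pyGet? cur pIa ≠ PySem.List.pyGet? L pIa := by
      intro h
      exact (hEq pIa hbdIa.1 hbdIa.2).mp h ⟨ia, le_rfl, by omega, rfl⟩
    have hne : ¬ (cur = L) := by
      intro h
      exact hneqIa (by rw [h])
    -- A's rightward scan finds pos[ia] after dRi steps
    have hfR : findPos idx cur L 1 = (pIa, dRi) := by
      unfold findPos
      have htarget : (idx + ((dRi.toNat : Nat) : Int)) % (L.length : Int) = pIa := by
        rw [Int.toNat_of_nonneg hdRi0, hdRi]
        unfold dR
        calc (idx + (pIa - idx) % (L.length : Int)) % (L.length : Int)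
            = ((pIa - idx) % (L.length : Int) + idx) % (L.length : Int) := by ring_nf
          _ = (pIa - idx + idx) % (L.length : Int) := emod_shift _ _ _
          _ = pIa % (L.length : Int) := by ring_nf
          _ = pIa := Int.emod_eq_of_lt hbdIa.1 hbdIa.2
      have happ := findPosGo_right cur L hlen hn dRi.toNat cur.length idx 0
        (by omega) h0 hlt
        (by
          intro t ht
          have ht' : (t : Int) < dRi := by
            have := Int.toNat_of_nonneg hdRi0
            omega
          set q := (idx + (t : Int)) % (L.length : Int) with hqdef
          have hq0 : 0 ≤ q := Int.emod_nonneg _ hnz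
          have hqn : q < (L.length : Int) := Int.emod_lt_of_pos _ hposn
          rw [hEq q hq0 hqn]
          rintro ⟨m, hm1, hm2, hm3⟩
          have hInv := hInvR m hm1 hm2
          rw [hm3] at hInv
          have hdq : dR (L.length : Int) idx q = (t : Int) := by
            unfold dR
            rw [hqdef, emod_shift_sub]
            have : idx + (t : Int) - idx = (t : Int) := by ring
            rw [this, Int.emod_eq_of_lt (by omega) (by omega)]
          rw [hdq] at hInv
          omega)
        (by rw [htarget]; exact hneqIa)
      rw [happ, htarget]
      have : (0 : Int) + (dRi.toNat : Int) = dRi := by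
        rw [Int.toNat_of_nonneg hdRi0]; ring
      rw [this]
    -- A's leftward scan: either idx itself differs (then (idx,0)) or it finds pos[ia+c]
    have hfL : ∃ rL : Int × Int, findPos idx cur L (-1) = rL ∧
        ((dRi ≤ rL.2) ↔ (dRi ≤ dLj)) ∧ (¬ dRi ≤ dLj → rL = (pJ, dLj)) := by
      rcases hInvD with ⟨-, hpia_idx⟩ | hInvL
      · have hdRi_z : dRi = 0 := by
          rw [hdRi, hpia_idx]
          unfold dR
          simp
        refine ⟨(idx, 0), ?_, ?_, ?_⟩
        · unfold findPos
          exact findPosGo_stop _ _ _ _ _ _ (by rw [hpia_idx] at hneqIa; exact hneqIa)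
        · simp only [hdRi_z]
          constructor <;> intro <;> omega
        · intro hcon; omega
      · have hLast : ia + (c + 1) - 1 = ia + c := by omega
        rw [hLast, ← hpJ] at hInvL
        have hneqJ : PySem.List.pyGet? cur pJ ≠ PySem.List.pyGet? L pJ := by
          intro h
          exact (hEq pJ hbdJ.1 hbdJ.2).mp h ⟨ia + c, by omega, by omega, rfl⟩
        refine ⟨(pJ, dLj), ?_, Iff.rfl, fun _ => rfl⟩
        unfold findPos
        have htarget : (idx - ((dLj.toNat : Nat) : Int)) % (L.length : Int) = pJ := by
          rw [Int.toNat_of_nonneg hdLj0, hdLj]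
          unfold dL
          rw [emod_shift_sub']
          have h1 : idx - (idx - pJ) = pJ := by ring
          rw [h1, Int.emod_eq_of_lt hbdJ.1 hbdJ.2]
        have happ := findPosGo_left cur L hlen hn dLj.toNat cur.length idx 0
          (by omega) h0 hlt
          (by
            intro t ht
            have ht' : (t : Int) < dLj := by
              have := Int.toNat_of_nonneg hdLj0
              omega
            set q := (idx - (t : Int)) % (L.length : Int) with hqdef
            have hq0 : 0 ≤ q := Int.emod_nonneg _ hnz
            have hqn : q < (L.length : Int) := Int.emod_lt_of_pos _ hposn
            rw [hEq q hq0 hqn]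
            rintro ⟨m, hm1, hm2, hm3⟩
            have hInv := hInvL m hm1 hm2
            rw [hm3] at hInv
            have hdq : dL (L.length : Int) idx q = (t : Int) := by
              unfold dL
              rw [hqdef, emod_shift_sub']
              have h2 : idx - (idx - (t : Int)) = (t : Int) := by ring
              rw [h2, Int.emod_eq_of_lt (by omega) (by omega)]
            rw [hdq, ← hdLj] at hInv
            omega)
          (by rw [htarget]; exact hneqJ)
        rw [happ, htarget]
        have h3 : (0 : Int) + (dLj.toNat : Int) = dLj := by
          rw [Int.toNat_of_nonneg hdLj0]; ring
        rw [h3]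
    obtain ⟨rL, hfLrun, hfLiff, hfLval⟩ := hfL
    -- index bookkeeping for goB's j argument
    have hjidx : (ia : Int) + ((c + 1 : Nat) : Int) - 1 = (((ia + c : Nat) : Nat) : Int) := by
      push_cast; ring
    have hguard : (ia : Int) ≤ (ia : Int) + ((c + 1 : Nat) : Int) - 1 := by push_cast; omega
    rw [solGo_succ fA cur idx control L hne (pIa, dRi) rL hfR hfLrun,
        goB_succ fB (ia : Int) ((ia : Int) + ((c + 1 : Nat) : Int) - 1) idx 0 pos (L.length : Int) hguard]
    simp only [hjidx, PySem.List.pyGetD_natCast]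
    have hmr : PySem.Int.mod (pos.getD ia 0 - idx) (L.length : Int) = dRi := by
      rw [PySem.Int.mod_eq_emod_of_pos hposn, hdRi, hpIa]
      rfl
    have hml : PySem.Int.mod (idx - pos.getD (ia + c) 0) (L.length : Int) = dLj := by
      rw [PySem.Int.mod_eq_emod_of_pos hposn, hdLj, hpJ]
      rfl
    rw [hmr, hml, ← hpIa, ← hpJ]
    by_cases hbr : dRi ≤ dLj
    · -- both take the right neighbour pos[ia]
      rw [if_pos (hfLiff.mpr hbr), if_pos hbr]
      have hIaNat : pIa.toNat < L.length := by omega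
      have hsetlen : (PySem.List.pySetD cur pIa (PySem.List.pyGetD L pIa 'A')).length = L.length := by
        rw [PySem.List.pySetD_of_nonneg cur _ hbdIa.1, List.length_set, hlen]
      have hvIa : PySem.List.pyGetD L pIa 'A' = L[pIa.toNat]'hIaNat :=
        PySem.List.pyGetD_eq_getElem L 'A' hbdIa.1 hbdIa.2
      have hcur' : ∀ p : Nat, p < L.length →
          ((PySem.List.pySetD cur pIa (PySem.List.pyGetD L pIa 'A'))[p]? = L[p]? ↔
            ¬ ∃ m : Nat, ia + 1 ≤ m ∧ m < ia + 1 + c ∧ pos.getD m 0 = (p : Int)) := by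
        intro p hp
        rw [PySem.List.pySetD_of_nonneg cur _ hbdIa.1, List.getElem?_set]
        by_cases hpe : pIa.toNat = p
        · rw [if_pos hpe, if_pos (by omega : pIa.toNat < cur.length), hvIa]
          subst hpe
          rw [List.getElem?_eq_getElem hIaNat]
          constructor
          · intro _
            rintro ⟨m, hm1, hm2, hm3⟩
            have hlt := hlt_mm ia m (by omega) (by omega)
            rw [hm3, ← hpIa] at hlt
            omega
          · intro _
            rfl
        · rw [if_neg hpe, hcur p hp]
          constructor
          · intro h
            rintro ⟨m, hm1, hm2, hm3⟩
            exact h ⟨m, by omega, by omega, hm3⟩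
          · intro h
            rintro ⟨m, hm1, hm2, hm3⟩
            rcases Nat.eq_or_lt_of_le hm1 with he | hlm
            · rw [← he, ← hpIa] at hm3
              omega
            · exact h ⟨m, by omega, by omega, hm3⟩
      have hInvR' : ∀ m : Nat, ia + 1 ≤ m → m < ia + 1 + c →
          dR (L.length : Int) pIa (pos.getD (ia + 1) 0) ≤ dR (L.length : Int) pIa (pos.getD m 0) := by
        intro m hm1 hm2
        have hb1 := hbdm (ia + 1) (by omega)
        have hbm := hbdm m (by omega)
        have hlt1 : pIa < pos.getD (ia + 1) 0 := by
          have := hlt_mm ia (ia + 1) (by omega) (by omega)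
          rw [← hpIa] at this
          exact this
        have hlem : pos.getD (ia + 1) 0 ≤ pos.getD m 0 := hle_mm _ _ (by omega) (by omega)
        unfold dR
        rw [emod_sub_eval hbdIa.1 hbdIa.2 hb1.1 hb1.2,
            emod_sub_eval hbdIa.1 hbdIa.2 hbm.1 hbm.2,
            if_pos (by omega), if_pos (by omega)]
        omega
      have hInvL' : ∀ m : Nat, ia + 1 ≤ m → m < ia + 1 + c →
          dL (L.length : Int) pIa (pos.getD (ia + 1 + c - 1) 0) ≤ dL (L.length : Int) pIa (pos.getD m 0) := by
        intro m hm1 hm2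
        have hlast : ia + 1 + c - 1 = ia + c := by omega
        rw [hlast]
        have hbm := hbdm m (by omega)
        have hbJ2 := hbdm (ia + c) (by omega)
        have hltm : pIa < pos.getD m 0 := by
          have := hlt_mm ia m (by omega) (by omega)
          rw [← hpIa] at this
          exact this
        have hltJ : pIa < pos.getD (ia + c) 0 := by
          have := hlt_mm ia (ia + c) (by omega) (by omega)
          rw [← hpIa] at this
          exact this
        have hlem : pos.getD m 0 ≤ pos.getD (ia + c) 0 := hle_mm _ _ (by omega) (by omega)
        unfold dL
        rw [emod_sub_eval hbJ2.1 hbJ2.2 hbdIa.1 hbdIa.2,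
            emod_sub_eval hbm.1 hbm.2 hbdIa.1 hbdIa.2,
            if_neg (by omega), if_neg (by omega)]
        omega
      have key := ih (ia + 1) (PySem.List.pySetD cur pIa (PySem.List.pyGetD L pIa 'A')) pIa
        (control + dRi + calClickNum (PySem.List.pyGetD L pIa 'A'))
        (by omega) hsetlen hbdIa.1 hbdIa.2 hcur' hInvR' (Or.inr hInvL') fA fB (by omega) (by omega)
      rw [key]
      have e2 : ((ia + 1 : Nat) : Int) + ((c : Nat) : Int) - 1 = ((ia + c : Nat) : Int) := by
        push_cast; ring
      have e1 : ((ia + 1 : Nat) : Int) = (ia : Int) + 1 := by push_cast; ring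
      rw [e2, e1,
        goB_acc pos (L.length : Int) fB ((ia : Int) + 1) ((ia + c : Nat) : Int) pIa (0 + dRi),
        cw_succ_left L pos ia c, ← hpIa]
      have hclick : clickAt L pIa = calClickNum (PySem.List.pyGetD L pIa 'A') := rfl
      rw [hclick]
      ring
    · -- both take the left neighbour pos[ia+c]
      rw [hfLval hbr]
      dsimp only
      rw [if_neg hbr, if_neg hbr]
      have hJNat : pJ.toNat < L.length := by omega
      have hsetlen : (PySem.List.pySetD cur pJ (PySem.List.pyGetD L pJ 'A')).length = L.length := by
        rw [PySem.List.pySetD_of_nonneg cur _ hbdJ.1, List.length_set, hlen]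
      have hvJ : PySem.List.pyGetD L pJ 'A' = L[pJ.toNat]'hJNat :=
        PySem.List.pyGetD_eq_getElem L 'A' hbdJ.1 hbdJ.2
      have hcur' : ∀ p : Nat, p < L.length →
          ((PySem.List.pySetD cur pJ (PySem.List.pyGetD L pJ 'A'))[p]? = L[p]? ↔
            ¬ ∃ m : Nat, ia ≤ m ∧ m < ia + c ∧ pos.getD m 0 = (p : Int)) := by
        intro p hp
        rw [PySem.List.pySetD_of_nonneg cur _ hbdJ.1, List.getElem?_set]
        by_cases hpe : pJ.toNat = p
        · rw [if_pos hpe, if_pos (by omega : pJ.toNat < cur.length), hvJ]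
          subst hpe
          rw [List.getElem?_eq_getElem hJNat]
          constructor
          · intro _
            rintro ⟨m, hm1, hm2, hm3⟩
            have hlt := hlt_mm m (ia + c) (by omega) (by omega)
            rw [hm3, ← hpJ] at hlt
            omega
          · intro _
            rfl
        · rw [if_neg hpe, hcur p hp]
          constructor
          · intro h
            rintro ⟨m, hm1, hm2, hm3⟩
            exact h ⟨m, hm1, by omega, hm3⟩
          · intro h
            rintro ⟨m, hm1, hm2, hm3⟩
            by_cases he : m = ia + c
            · rw [he, ← hpJ] at hm3
              omega
            · exact h ⟨m, hm1, by omega, hm3⟩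
      have hInvR' : ∀ m : Nat, ia ≤ m → m < ia + c →
          dR (L.length : Int) pJ (pos.getD ia 0) ≤ dR (L.length : Int) pJ (pos.getD m 0) := by
        intro m hm1 hm2
        have hbi := hbdm ia (by omega)
        have hbm := hbdm m (by omega)
        have hltm : pos.getD m 0 < pJ := by
          have := hlt_mm m (ia + c) (by omega) (by omega)
          rw [← hpJ] at this
          exact this
        have hlti : pos.getD ia 0 < pJ := by
          have := hlt_mm ia (ia + c) (by omega) (by omega)
          rw [← hpJ] at this
          exact this
        have hlem : pos.getD ia 0 ≤ pos.getD m 0 := hle_mm _ _ (by omega) (by omega)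
        unfold dR
        rw [emod_sub_eval hbdJ.1 hbdJ.2 hbi.1 hbi.2,
            emod_sub_eval hbdJ.1 hbdJ.2 hbm.1 hbm.2,
            if_neg (by omega), if_neg (by omega)]
        omega
      have hInvL' : ∀ m : Nat, ia ≤ m → m < ia + c →
          dL (L.length : Int) pJ (pos.getD (ia + c - 1) 0) ≤ dL (L.length : Int) pJ (pos.getD m 0) := by
        intro m hm1 hm2
        have hbm := hbdm m (by omega)
        have hbl := hbdm (ia + c - 1) (by omega)
        have hltm : pos.getD m 0 < pJ := by
          have := hlt_mm m (ia + c) (by omega) (by omega)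
          rw [← hpJ] at this
          exact this
        have hltl : pos.getD (ia + c - 1) 0 < pJ := by
          have := hlt_mm (ia + c - 1) (ia + c) (by omega) (by omega)
          rw [← hpJ] at this
          exact this
        have hlem : pos.getD m 0 ≤ pos.getD (ia + c - 1) 0 := hle_mm _ _ (by omega) (by omega)
        unfold dL
        rw [emod_sub_eval hbl.1 hbl.2 hbdJ.1 hbdJ.2,
            emod_sub_eval hbm.1 hbm.2 hbdJ.1 hbdJ.2,
            if_pos (by omega), if_pos (by omega)]
        omega
      have key := ih ia (PySem.List.pySetD cur pJ (PySem.List.pyGetD L pJ 'A')) pJ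
        (control + dLj + calClickNum (PySem.List.pyGetD L pJ 'A'))
        (by omega) hsetlen hbdJ.1 hbdJ.2 hcur' hInvR' (Or.inr hInvL') fA fB (by omega) (by omega)
      rw [key]
      have e3 : ((ia + c : Nat) : Int) - 1 = (ia : Int) + ((c : Nat) : Int) - 1 := by
        push_cast; ring
      rw [e3,
        goB_acc pos (L.length : Int) fB ((ia : Int)) ((ia : Int) + ((c : Nat) : Int) - 1) pJ (0 + dLj),
        cw_succ_right L pos ia c, ← hpJ]
      have hclick : clickAt L pJ = calClickNum (PySem.List.pyGetD L pJ 'A') := rfl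
      rw [hclick]
      ring


def posOf (L : List Char) : List Int :=
  ((PySem.List.enumerate L 0).filter (fun p => p.2 != 'A')).map (fun p => p.1)

lemma mem_posOf (L : List Char) (q : Int) :
    q ∈ posOf L ↔ ∃ k : Nat, ∃ hk : k < L.length, q = (k : Int) ∧ L[k] ≠ 'A' := by
  unfold posOf
  simp only [List.mem_map, List.mem_filter, PySem.List.mem_enumerate_iff]
  constructor
  · rintro ⟨p, ⟨⟨k, hk, rfl⟩, hne⟩, rfl⟩
    refine ⟨k, hk, by simp, by simpa using hne⟩
  · rintro ⟨k, hk, rfl, hne⟩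
    exact ⟨((k : Int), L[k]), ⟨⟨k, hk, by simp⟩, by simpa using hne⟩, rfl⟩

lemma posOf_bd (L : List Char) : ∀ p ∈ posOf L, 0 ≤ p ∧ p < (L.length : Int) := by
  intro p hp
  rcases (mem_posOf L p).mp hp with ⟨k, hk, rfl, -⟩
  constructor
  · exact_mod_cast Nat.zero_le k
  · exact_mod_cast hk

lemma posOf_sorted (L : List Char) : (posOf L).Pairwise (· < ·) := by
  unfold posOf
  rw [List.pairwise_map]
  exact (PySem.List.pairwise_lt_enumerate L 0).filter _

lemma sum_getD (h : Int → Int) : ∀ l : List Int,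
    ∑ t ∈ Finset.range l.length, h (l.getD t 0) = (l.map h).sum := by
  intro l
  induction l with
  | nil => simp
  | cons x xs ih =>
    rw [List.length_cons, Finset.sum_range_succ']
    simp only [List.getD_cons_succ, List.getD_cons_zero, ih, List.map_cons, List.sum_cons]
    ring

lemma enum_filter_map_snd (g : Char → Int) :
    ∀ (L : List Char) (s : Int),
    ((PySem.List.enumerate L s).filter (fun p => p.2 != 'A')).map (fun p => g p.2)
      = (L.filter (fun c => c != 'A')).map g := by
  intro L
  induction L with
  | nil => intro s; simp [PySem.List.enumerate_nil]
  | cons x xs ih =>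
    intro s
    rw [PySem.List.enumerate_cons]
    by_cases hx : x = 'A'
    · simp [hx, ih (s + 1)]
    · simp [hx, ih (s + 1)]

lemma cw_posOf (L : List Char) :
    cw L (posOf L) 0 (posOf L).length
      = ((L.filter (fun c => c != 'A')).map
          (fun c => min ((c.toNat : Int) - 65) (91 - (c.toNat : Int)))).sum := by
  unfold cw
  simp only [Nat.zero_add]
  rw [sum_getD (clickAt L) (posOf L)]
  have h1 : (posOf L).map (clickAt L)
      = ((PySem.List.enumerate L 0).filter (fun p => p.2 != 'A')).map (fun p => clickAt L p.1) := by
    unfold posOf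
    rw [List.map_map]
    rfl
  have h2 : ((PySem.List.enumerate L 0).filter (fun p => p.2 != 'A')).map (fun p => clickAt L p.1)
      = ((PySem.List.enumerate L 0).filter (fun p => p.2 != 'A')).map (fun p => calClickNum p.2) := by
    apply List.map_congr_left
    intro p hp
    have hp' := List.mem_of_mem_filter hp
    rcases (PySem.List.mem_enumerate_iff L 0 p).mp hp' with ⟨k, hk, rfl⟩
    unfold clickAt
    simp only [zero_add]
    rw [PySem.List.pyGetD_natCast, List.getD_eq_getElem L 'A' hk]
  have h3 : ((PySem.List.enumerate L 0).filter (fun p => p.2 != 'A')).map (fun p => calClickNum p.2)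
      = (L.filter (fun c => c != 'A')).map calClickNum := enum_filter_map_snd calClickNum L 0
  rw [h1, h2, h3]
  apply congrArg
  apply List.map_congr_left
  intro c _
  unfold calClickNum
  omega

lemma posOf_len_le (L : List Char) : (posOf L).length ≤ L.length := by
  unfold posOf
  rw [List.length_map]
  calc ((PySem.List.enumerate L 0).filter (fun p => p.2 != 'A')).length
      ≤ (PySem.List.enumerate L 0).length := List.length_filter_le _ _
    _ = L.length := PySem.List.length_enumerate L 0

lemma exists_idx_iff_mem (pos : List Int) (q : Int) :
    (∃ m : Nat, m < pos.length ∧ pos.getD m 0 = q) ↔ q ∈ pos := by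
  constructor
  · rintro ⟨m, hm, rfl⟩
    rw [List.getD_eq_getElem pos 0 hm]
    exact List.getElem_mem hm
  · intro hq
    rcases List.mem_iff_getElem.mp hq with ⟨m, hm, rfl⟩
    exact ⟨m, hm, List.getD_eq_getElem pos 0 hm⟩

-- ===== VERDICT (by name: the statement is the Claim_ definition above) =====
theorem solution_spec : Claim_equal_solution := by
  unfold Claim_equal_solution Spec_solution
  intro name _
  by_cases hL : name.toList = []
  · simp [solution, solution_alt, hL, solGo, goB, PySem.List.enumerate_nil]
  · have hn : 0 < name.toList.length := List.length_pos_iff.mpr hL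
    have hposn : (0 : Int) < (name.toList.length : Int) := by exact_mod_cast hn
    have hcur0 : ∀ p : Nat, p < name.toList.length →
        ((List.replicate name.toList.length 'A')[p]? = name.toList[p]? ↔
          ¬ ∃ m : Nat, 0 ≤ m ∧ m < 0 + (posOf name.toList).length ∧ (posOf name.toList).getD m 0 = (p : Int)) := by
      intro p hp
      rw [List.getElem?_replicate, if_pos hp, List.getElem?_eq_getElem hp]
      have hm : (∃ m : Nat, 0 ≤ m ∧ m < 0 + (posOf name.toList).length ∧ (posOf name.toList).getD m 0 = (p : Int))
          ↔ (p : Int) ∈ posOf name.toList := by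
        rw [← exists_idx_iff_mem]
        constructor
        · rintro ⟨m, -, hm2, hm3⟩; exact ⟨m, by omega, hm3⟩
        · rintro ⟨m, hm1, hm3⟩; exact ⟨m, by omega, by omega, hm3⟩
      rw [hm, mem_posOf]
      constructor
      · intro h
        rintro ⟨k, hk, hkp, hne⟩
        have : k = p := by exact_mod_cast hkp.symm
        subst this
        exact hne (by injection h with h'; exact h'.symm)
      · intro h
        by_contra hne
        exact h ⟨p, hp, rfl, fun he => hne (by rw [he])⟩
    have hInvR0 : ∀ m : Nat, 0 ≤ m → m < 0 + (posOf name.toList).length →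
        dR (name.toList.length : Int) 0 ((posOf name.toList).getD 0 0)
          ≤ dR (name.toList.length : Int) 0 ((posOf name.toList).getD m 0) := by
      intro m _ hm2
      have hb0 : 0 ≤ (posOf name.toList).getD 0 0 ∧ (posOf name.toList).getD 0 0 < (name.toList.length : Int) := by
        rw [List.getD_eq_getElem _ 0 (by omega)]
        exact posOf_bd _ _ (List.getElem_mem (by omega))
      have hbm : 0 ≤ (posOf name.toList).getD m 0 ∧ (posOf name.toList).getD m 0 < (name.toList.length : Int) := by
        rw [List.getD_eq_getElem _ 0 (by omega)]
        exact posOf_bd _ _ (List.getElem_mem (by omega))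
      have hle : (posOf name.toList).getD 0 0 ≤ (posOf name.toList).getD m 0 := by
        rcases Nat.eq_zero_or_pos m with h | h
        · rw [h]
        · rw [List.getD_eq_getElem _ 0 (by omega), List.getD_eq_getElem _ 0 (by omega)]
          exact le_of_lt (List.pairwise_iff_getElem.mp (posOf_sorted name.toList) 0 m (by omega) (by omega) h)
      unfold dR
      rw [emod_sub_eval le_rfl hposn hb0.1 hb0.2, emod_sub_eval le_rfl hposn hbm.1 hbm.2,
          if_pos hb0.1, if_pos hbm.1]
      omega
    have hInvD0 : ((posOf name.toList).length ≠ 0 ∧ (posOf name.toList).getD 0 0 = 0) ∨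
        (∀ m : Nat, 0 ≤ m → m < 0 + (posOf name.toList).length →
          dL (name.toList.length : Int) 0 ((posOf name.toList).getD (0 + (posOf name.toList).length - 1) 0)
            ≤ dL (name.toList.length : Int) 0 ((posOf name.toList).getD m 0)) := by
      by_cases hk : (posOf name.toList).length = 0
      · exact Or.inr (fun m _ hm2 => by omega)
      · by_cases h0 : (posOf name.toList).getD 0 0 = 0
        · exact Or.inl ⟨hk, h0⟩
        · refine Or.inr (fun m _ hm2 => ?_)
          have hbm : 0 ≤ (posOf name.toList).getD m 0 ∧ (posOf name.toList).getD m 0 < (name.toList.length : Int) := by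
            rw [List.getD_eq_getElem _ 0 (by omega)]
            exact posOf_bd _ _ (List.getElem_mem (by omega))
          have hbl : 0 ≤ (posOf name.toList).getD ((posOf name.toList).length - 1) 0
              ∧ (posOf name.toList).getD ((posOf name.toList).length - 1) 0 < (name.toList.length : Int) := by
            rw [List.getD_eq_getElem _ 0 (by omega)]
            exact posOf_bd _ _ (List.getElem_mem (by omega))
          have hb0 : 0 ≤ (posOf name.toList).getD 0 0 := by
            rw [List.getD_eq_getElem _ 0 (by omega)]
            exact (posOf_bd _ _ (List.getElem_mem (by omega))).1
          have hmpos : 0 < (posOf name.toList).getD m 0 := by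
            rcases Nat.eq_zero_or_pos m with h | h
            · rw [h]; omega
            · rw [List.getD_eq_getElem _ 0 (by omega)]
              have := List.pairwise_iff_getElem.mp (posOf_sorted name.toList) 0 m (by omega) (by omega) h
              rw [List.getD_eq_getElem _ 0 (by omega)] at hb0 h0
              omega
          have hle : (posOf name.toList).getD m 0 ≤ (posOf name.toList).getD ((posOf name.toList).length - 1) 0 := by
            rcases Nat.eq_or_lt_of_le (by omega : m ≤ (posOf name.toList).length - 1) with h | h
            · rw [h]
            · rw [List.getD_eq_getElem _ 0 (by omega), List.getD_eq_getElem _ 0 (by omega)]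
              exact le_of_lt (List.pairwise_iff_getElem.mp (posOf_sorted name.toList) m _ (by omega) (by omega) h)
          have hsimp : 0 + (posOf name.toList).length - 1 = (posOf name.toList).length - 1 := by omega
          rw [hsimp]
          unfold dL
          rw [emod_sub_eval hbl.1 hbl.2 le_rfl hposn, emod_sub_eval hbm.1 hbm.2 le_rfl hposn,
              if_neg (by omega), if_neg (by omega)]
          omega
    have key := solGo_eq_goB name.toList (posOf name.toList) (posOf_bd name.toList) (posOf_sorted name.toList)
      (posOf name.toList).length 0 (List.replicate name.toList.length 'A') 0 0
      (by omega) (List.length_replicate) le_rfl hposn hcur0 hInvR0 hInvD0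
      name.toList.length (posOf name.toList).length (by simpa using posOf_len_le name.toList) le_rfl
    have hsolA : solution name = solGo name.toList.length (List.replicate name.toList.length 'A') 0 0 name.toList := rfl
    have hsolB : solution_alt name
        = goB (posOf name.toList).length 0 (((posOf name.toList).length : Int) - 1) 0 0 (posOf name.toList) (name.toList.length : Int)
          + ((name.toList.filter (fun c => c != 'A')).map
              (fun c => min ((c.toNat : Int) - 65) (91 - (c.toNat : Int)))).sum := rfl
    rw [hsolA, hsolB, key, cw_posOf]
    have e0 : ((0 : Nat) : Int) = 0 := rfl
    have e1 : ((0 : Nat) : Int) + (((posOf name.toList).length : Nat) : Int) - 1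
        = ((posOf name.toList).length : Int) - 1 := by push_cast; ring
    rw [e1, e0]
    ring
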